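-- pv_equiv track=rewrite | github.com/DiabCh/probleme-hackerrank | easy_problems/Capitalize.py | solve
-- ===== SOURCE A (Python) =====
-- def solve(s):
--
--     s = s.split(' ')
--     srr =''
--     for name in s:
--         letters = 0
--         for letter in name:
--             if letter.isalpha() and letters == 0 and name.isalpha():
--                 srr += letter.upper()
--                 letters+=1
--             else:
--                 srr += letter
--         srr += " "
--     return srr
-- ===== SOURCE B (Python) =====
-- def solve(s):
--     result = []
--     for name in s.split(' '):
--         if name.isalpha():
--             result.append(name[0].upper() + name[1:])
--         else:
--             result.append(name)
--     return ' '.join(result) + ' '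
-- ===== Notes on version B (the rewrite author's own statement) =====
-- stated objective: simpler
-- what changed: Replaces A's nested character-by-character loop (per-word counter, name.isalpha() re-checked for every character, string concatenation per character) by a single pass over the words that capitalizes each fully-alphabetic word via slicing and one final join.
import Mathlib
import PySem

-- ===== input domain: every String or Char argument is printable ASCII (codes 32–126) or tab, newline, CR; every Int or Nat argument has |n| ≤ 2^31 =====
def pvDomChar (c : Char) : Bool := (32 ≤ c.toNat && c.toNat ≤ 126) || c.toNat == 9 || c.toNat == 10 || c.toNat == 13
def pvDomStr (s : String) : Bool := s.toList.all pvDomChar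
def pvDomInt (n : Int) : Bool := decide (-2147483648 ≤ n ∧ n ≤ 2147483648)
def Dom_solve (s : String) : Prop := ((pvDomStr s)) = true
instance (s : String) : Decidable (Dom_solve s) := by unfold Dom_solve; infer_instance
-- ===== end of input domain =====

-- B replaces A's nested per-character loop (with a per-word counter and repeated
-- name.isalpha() checks) by one pass over the words, capitalizing via slicing and
-- a single join; objective: simpler.

-- ===== PORT A =====
-- the inner for-letter loop body, carried state = (srr, letters)
def solveStep (name : List Char) (p : List Char × Nat) (letter : Char) : List Char × Nat :=
  if PySem.Chars.isalpha letter && (p.2 == 0) && PySem.Chars.strIsalpha name then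
    (p.1 ++ [PySem.Chars.upperChar letter], p.2 + 1)
  else
    (p.1 ++ [letter], p.2)

def solve (s : String) : String :=
  String.ofList
    ((PySem.Chars.splitOn s.toList [' ']).foldl
      (fun srr name => (name.foldl (solveStep name) (srr, 0)).1 ++ [' ']) [])

-- ===== PORT B =====
-- per-word body: name[0].upper() + name[1:] if name.isalpha() else name
def capWord (name : List Char) : List Char :=
  if PySem.Chars.strIsalpha name then
    match name with
    | [] => name
    | c :: rest => PySem.Chars.upperChar c :: rest
  else name

def solve_alt (s : String) : String :=
  String.ofList
    (PySem.Chars.join [' '] ((PySem.Chars.splitOn s.toList [' ']).map capWord) ++ [' '])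

-- ===== PRECONDITION & SPEC =====
def Spec_solve (s : String) (out : String) : Prop := out = solve_alt s
instance (s : String) (out : String) : Decidable (Spec_solve s out) := by unfold Spec_solve; infer_instance

-- ===== CLAIM (what is proved, stated in full; the proofs are below) =====
def Claim_equal_solve : Prop := ∀ (s : String), Dom_solve s → Spec_solve s (solve s)

-- ===== LEMMAS AND PROOFS =====

-- once letters ≠ 0 (or for any nonzero state), the inner loop just copies letters
theorem fold_pos (name : List Char) : ∀ (cs srr : List Char) (k : Nat), k ≠ 0 →
    cs.foldl (solveStep name) (srr, k) = (srr ++ cs, k) := by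
  intro cs
  induction cs with
  | nil => intro srr k hk; simp
  | cons c rest ih =>
    intro srr k hk
    have hkf : (k == 0) = false := by simp [hk]
    simp [List.foldl, solveStep, hkf, ih (srr ++ [c]) k hk]

-- a non-alphabetic word is copied unchanged
theorem fold_nonalpha (name : List Char) (h : PySem.Chars.strIsalpha name = false) :
    ∀ (cs srr : List Char), cs.foldl (solveStep name) (srr, 0) = (srr ++ cs, 0) := by
  intro cs
  induction cs with
  | nil => intro srr; simp
  | cons c rest ih =>
    intro srr
    simp [List.foldl, solveStep, h, ih (srr ++ [c])]

-- the inner loop over one word appends exactly capWord of that word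
theorem word_lemma (name srr : List Char) :
    (name.foldl (solveStep name) (srr, 0)).1 = srr ++ capWord name := by
  by_cases h : PySem.Chars.strIsalpha name = true
  · cases name with
    | nil => simp [PySem.Chars.strIsalpha] at h
    | cons c rest =>
      have hc : PySem.Chars.isalpha c = true := by
        simp [PySem.Chars.strIsalpha] at h; exact h.1
      simp only [List.foldl, solveStep, hc, h, Bool.and_self, beq_self_eq_true, if_true]
      rw [fold_pos (c :: rest) rest (srr ++ [PySem.Chars.upperChar c]) 1 (by omega)]
      simp [capWord, h]
  · have hf : PySem.Chars.strIsalpha name = false := by simpa using h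
    rw [fold_nonalpha name hf name srr]
    simp [capWord, hf]

-- the outer loop joins the capitalized words with single spaces plus a trailing space
theorem outer_g : ∀ (ws : List (List Char)), ws ≠ [] → ∀ (srr : List Char),
    ws.foldl (fun srr name => srr ++ capWord name ++ [' ']) srr
      = srr ++ PySem.Chars.join [' '] (ws.map capWord) ++ [' '] := by
  intro ws
  induction ws with
  | nil => intro h; exact absurd rfl h
  | cons w rest ih =>
    intro _ srr
    cases rest with
    | nil =>
      simp [List.foldl, PySem.Chars.join_singleton]
    | cons y t =>
      rw [List.foldl_cons, ih (by simp) (srr ++ capWord w ++ [' '])]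
      simp [List.map, PySem.Chars.join_cons_cons]

-- splitOn never returns the empty list
theorem splitOn_go_ne_nil (sep : List Char) :
    ∀ (fuel : Nat) (l cur : List Char) (acc : List (List Char)),
    PySem.Chars.splitOn.go sep fuel l cur acc ≠ [] := by
  intro fuel
  induction fuel with
  | zero => intro l cur acc; simp [PySem.Chars.splitOn.go]
  | succ n ih =>
    intro l cur acc
    cases l with
    | nil => simp [PySem.Chars.splitOn.go]
    | cons c rest =>
      rw [PySem.Chars.splitOn.go]
      split
      · exact ih _ _ _
      · exact ih _ _ _

theorem splitOn_ne_nil (s sep : List Char) : PySem.Chars.splitOn s sep ≠ [] := by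
  unfold PySem.Chars.splitOn
  exact splitOn_go_ne_nil sep _ s [] []

-- ===== VERDICT (by name: the statement is the Claim_ definition above) =====
theorem solve_spec : Claim_equal_solve := by
  intro s _
  unfold Spec_solve solve solve_alt
  simp only [word_lemma]
  rw [outer_g _ (splitOn_ne_nil s.toList [' ']) []]
  simp
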